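-- pv_equiv track=rewrite | github.com/AZhenWang/vw | app/common/function.py | combine_cols
-- ===== SOURCE A (Python) =====
-- def combine_cols(columns=[]):
--     """combine columns orderly
--
--     :param columns:
--     :return:
--     """
--     def combine(l, n):
--         answers = []
--         one = [0] * n
--
--         def next_c(li=0, ni=0):
--             if ni == n:
--                 answers.append(one.copy())
--                 return
--             for lj in range(li, len(l)):
--                 one[ni] = l[lj]
--                 next_c(lj + 1, ni + 1)
--
--         next_c()
--         return answers
--
--     combined_cols_set = []
--     length = len(columns)
--
--     for i in range(length, 0, -1):
--         combined_cols_set.append(combine(columns, i))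
--
--     return combined_cols_set
-- ===== SOURCE B (Python) =====
-- from itertools import combinations
--
--
-- def combine_cols(columns=[]):
--     """combine columns orderly: all combinations of each size, largest size first."""
--     return [[list(c) for c in combinations(columns, i)]
--             for i in range(len(columns), 0, -1)]
-- ===== Notes on version B (the rewrite author's own statement) =====
-- stated objective: idiomatic
-- what changed: Replaced the hand-written mutable-state backtracking (nested next_c recursion over a shared `one` buffer) with itertools.combinations in a comprehension, descending sizes.
import Mathlib
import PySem

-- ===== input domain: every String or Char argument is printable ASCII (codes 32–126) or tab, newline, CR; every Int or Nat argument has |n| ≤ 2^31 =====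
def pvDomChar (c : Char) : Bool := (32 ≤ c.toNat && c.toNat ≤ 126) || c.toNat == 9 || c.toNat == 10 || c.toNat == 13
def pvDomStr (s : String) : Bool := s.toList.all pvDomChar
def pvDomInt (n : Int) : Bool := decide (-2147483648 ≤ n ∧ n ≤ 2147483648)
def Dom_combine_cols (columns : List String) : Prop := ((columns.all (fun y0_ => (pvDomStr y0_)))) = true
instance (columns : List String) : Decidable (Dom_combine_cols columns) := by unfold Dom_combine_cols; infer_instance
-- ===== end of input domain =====

-- B replaces A's mutable-buffer backtracking (nested next_c recursion writing into a shared
-- `one` list) with the idiomatic itertools.combinations comprehension; same results, same cost.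

-- ===== PORT A =====
-- next_c: the `for lj in range(li, len(l))` loop is the foldl over range' li (len-li);
-- the mutable globals `one` and `answers` are threaded through as state (the pair).
-- `fuel` is only a structural-recursion counter: A always calls with fuel = n - ni,
-- so the fuel-0 fallback is unreachable (the guard just makes the recursion total).
def nextcA (l : List String) (n : Nat) (fuel li ni : Nat) (one : List String)
    (answers : List (List String)) : List String × List (List String) :=
  if ni = n then (one, answers ++ [one])           -- answers.append(one.copy())
  else match fuel with
    | 0 => (one, answers)
    | k+1 =>
      (List.range' li (l.length - li)).foldl
        (fun st lj =>
          nextcA l n k (lj+1) (ni+1) (st.1.set ni (l.getD lj "")) st.2)  -- one[ni] = l[lj]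
        (one, answers)

-- combine(l, n): `one = [0] * n` holds integer placeholders that are always overwritten
-- before any copy is appended; represented by "" (never read).
def combineA (l : List String) (n : Nat) : List (List String) :=
  (nextcA l n n 0 0 (List.replicate n "") []).2

def combine_cols (columns : List String) : List (List (List String)) :=
  (PySem.List.pyRange columns.length 0 (-1)).foldl
    (fun acc i => acc ++ [combineA columns i.toNat]) []

-- ===== PORT B =====
-- itertools.combinations(l, n) as lists, in itertools' index-lexicographic order
def combB : Nat → List String → List (List String)
  | 0, _ => [[]]
  | _+1, [] => []
  | m+1, x :: xs => ((combB m xs).map (fun c => x :: c)) ++ combB (m+1) xs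

def combine_cols_alt (columns : List String) : List (List (List String)) :=
  (PySem.List.pyRange columns.length 0 (-1)).map (fun i => combB i.toNat columns)

-- ===== PRECONDITION & SPEC =====
def Spec_combine_cols (columns : List String) (out : List (List (List String))) : Prop := out = combine_cols_alt columns
instance (columns : List String) (out : List (List (List String))) : Decidable (Spec_combine_cols columns out) := by unfold Spec_combine_cols; infer_instance

-- ===== CLAIM (what is proved, stated in full; the proofs are below) =====
def Claim_equal_combine_cols : Prop := ∀ (columns : List String), Dom_combine_cols columns → Spec_combine_cols columns (combine_cols columns)

-- ===== LEMMAS AND PROOFS =====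

-- Invariant of A's backtracking: with the first ni slots of `one` fixed, next_c appends to
-- `answers` exactly the combinations of size n-ni from l[li:], each prefixed by one[:ni];
-- `one` keeps its length and its first ni entries.
theorem nextcA_spec (l : List String) (n : Nat) :
    ∀ fuel li ni (one : List String) answers, n - ni = fuel → ni ≤ n → one.length = n →
      (nextcA l n fuel li ni one answers).1.length = n ∧
      (nextcA l n fuel li ni one answers).1.take ni = one.take ni ∧
      (nextcA l n fuel li ni one answers).2 =
        answers ++ (combB (n - ni) (l.drop li)).map (fun c => one.take ni ++ c) := by
  intro fuel
  induction fuel with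
  | zero =>
    intro li ni one answers hfuel hni hlen
    have hn : ni = n := by omega
    subst hn
    simp [nextcA, combB, List.take_of_length_le (le_of_eq hlen), hlen]
  | succ k ih =>
    intro li ni one answers hfuel hni hlen
    have hni' : ni < n := by omega
    have hne : ¬ ni = n := by omega
    have hunf : nextcA l n (k+1) li ni one answers =
        (List.range' li (l.length - li)).foldl
          (fun st lj =>
            nextcA l n k (lj+1) (ni+1) (st.1.set ni (l.getD lj "")) st.2)
          (one, answers) := by
      rw [nextcA, if_neg hne]
    rw [hunf]
    -- inner induction over the remaining loop iterations m = l.length - li,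
    -- with the threaded state (one, answers) generalized
    suffices H : ∀ m li' (one' : List String) ans', l.length - li' = m → one'.length = n →
        (((List.range' li' m).foldl
          (fun st lj =>
            nextcA l n k (lj+1) (ni+1) (st.1.set ni (l.getD lj "")) st.2)
          (one', ans')).1.length = n ∧
        ((List.range' li' m).foldl
          (fun st lj =>
            nextcA l n k (lj+1) (ni+1) (st.1.set ni (l.getD lj "")) st.2)
          (one', ans')).1.take ni = one'.take ni ∧
        ((List.range' li' m).foldl
          (fun st lj =>
            nextcA l n k (lj+1) (ni+1) (st.1.set ni (l.getD lj "")) st.2)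
          (one', ans')).2 =
          ans' ++ (combB (n - ni) (l.drop li')).map (fun c => one'.take ni ++ c)) by
      exact H (l.length - li) li one answers rfl hlen
    intro m
    induction m with
    | zero =>
      intro li' one' ans' hm hlen'
      have hle : l.length ≤ li' := by omega
      refine ⟨hlen', rfl, ?_⟩
      rw [List.drop_eq_nil_of_le hle, hfuel]
      simp [combB]
    | succ m ihm =>
      intro li' one' ans' hm hlen'
      have h : li' < l.length := by omega
      have hm' : l.length - (li'+1) = m := by omega
      rw [List.range'_succ, List.foldl_cons]
      have hlen2 : (one'.set ni (l.getD li' "")).length = n := by simp [hlen']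
      obtain ⟨ihl1, iht1, iha1⟩ :=
        ih (li'+1) (ni+1) (one'.set ni (l.getD li' "")) ans' (by omega) (by omega) hlen2
      obtain ⟨ihl2, iht2, iha2⟩ :=
        ihm (li'+1) (nextcA l n k (li'+1) (ni+1) (one'.set ni (l.getD li' "")) ans').1
          (nextcA l n k (li'+1) (ni+1) (one'.set ni (l.getD li' "")) ans').2 hm' ihl1
      have h2 : (one'.set ni (l.getD li' "")).take ni = one'.take ni := by
        apply List.ext_getElem
        · simp
        · intro i h1i h2i
          simp only [List.getElem_take, List.getElem_set]
          rw [if_neg (by simp at h1i; omega)]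
      have hrtake :
          (nextcA l n k (li'+1) (ni+1) (one'.set ni (l.getD li' "")) ans').1.take ni
            = one'.take ni := by
        have h1 := congrArg (List.take ni) iht1
        have hmin : min ni (ni + 1) = ni := by omega
        simp only [List.take_take, hmin] at h1
        rw [h1, h2]
      refine ⟨by simpa using ihl2, ?_, ?_⟩
      · rw [← hrtake, ← iht2]
      · have hone'take : (one'.set ni (l.getD li' "")).take (ni + 1)
            = one'.take ni ++ [l[li']] := by
          rw [List.take_add_one, h2]
          congr 1
          simp [hlen', hni', List.getD_eq_getElem?_getD, List.getElem?_eq_getElem h]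
        have hdrop : l.drop li' = l[li'] :: l.drop (li' + 1) := List.drop_eq_getElem_cons h
        have hsub : n - ni = (n - (ni + 1)) + 1 := by omega
        have hone2 : ∀ a : List String,
            (one'.set ni (l.getD li' "")).take (ni + 1) ++ a = one'.take ni ++ l[li'] :: a := by
          intro a; rw [hone'take]; simp
        rw [iha2, iha1, hrtake, hdrop, hsub]
        simp only [combB, List.map_append, List.append_assoc, List.map_map, Function.comp_def]
        refine congrArg _ ?_
        congr 1
        exact List.map_congr_left (fun a _ => hone2 a)

theorem combineA_eq_combB (l : List String) (n : Nat) : combineA l n = combB n l := by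
  have h := nextcA_spec l n n 0 0 (List.replicate n "") [] rfl (Nat.zero_le n) (by simp)
  simpa [combineA] using h.2.2

theorem combine_cols_spec_aux (columns : List String) :
    combine_cols columns = combine_cols_alt columns := by
  unfold combine_cols combine_cols_alt
  rw [PySem.List.foldl_append_singleton_eq_map]
  simp [combineA_eq_combB]

-- ===== VERDICT (by name: the statement is the Claim_ definition above) =====
theorem combine_cols_spec : Claim_equal_combine_cols := by
  intro columns _
  exact combine_cols_spec_aux columns
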